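-- pv_equiv track=rewrite | github.com/LaurentPRAT-DB/ACME_CapitalIQ_IdentityReco | src/data/large_dataset_generator.py | _map_industry_to_sector
-- ===== SOURCE A (Python) =====
-- def _map_industry_to_sector(industry: str) -> str:
--     """Map industry to sector"""
--     sector_map = {
--         "Technology": ["Technology Hardware", "Software", "Semiconductors", "Internet Services"],
--         "Communication Services": ["Telecommunications", "Media & Entertainment"],
--         "Consumer Discretionary": ["E-commerce", "Retail", "Restaurants", "Automotive"],
--         "Consumer Staples": ["Consumer Goods", "Food & Beverage"],
--         "Financials": ["Financial Services", "Banking", "Insurance", "Real Estate"],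
--         "Healthcare": ["Pharmaceuticals", "Biotechnology", "Medical Devices", "Healthcare Services"],
--         "Industrials": ["Aerospace & Defense", "Industrial Machinery", "Transportation", "Logistics", "Construction"],
--         "Energy": ["Oil & Gas", "Utilities", "Renewable Energy"],
--         "Materials": ["Materials"]
--     }
--
--     for sector, industries in sector_map.items():
--         if industry in industries:
--             return sector
--
--     return "Other"
-- ===== SOURCE B (Python) =====
-- # B: binary search over a sorted (industry, sector) table instead of scanning each
-- # sector's industry list; same default "Other".
-- _SORTED = [
--     ("Aerospace & Defense", "Industrials"),
--     ("Automotive", "Consumer Discretionary"),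
--     ("Banking", "Financials"),
--     ("Biotechnology", "Healthcare"),
--     ("Construction", "Industrials"),
--     ("Consumer Goods", "Consumer Staples"),
--     ("E-commerce", "Consumer Discretionary"),
--     ("Financial Services", "Financials"),
--     ("Food & Beverage", "Consumer Staples"),
--     ("Healthcare Services", "Healthcare"),
--     ("Industrial Machinery", "Industrials"),
--     ("Insurance", "Financials"),
--     ("Internet Services", "Technology"),
--     ("Logistics", "Industrials"),
--     ("Materials", "Materials"),
--     ("Media & Entertainment", "Communication Services"),
--     ("Medical Devices", "Healthcare"),
--     ("Oil & Gas", "Energy"),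
--     ("Pharmaceuticals", "Healthcare"),
--     ("Real Estate", "Financials"),
--     ("Renewable Energy", "Energy"),
--     ("Restaurants", "Consumer Discretionary"),
--     ("Retail", "Consumer Discretionary"),
--     ("Semiconductors", "Technology"),
--     ("Software", "Technology"),
--     ("Technology Hardware", "Technology"),
--     ("Telecommunications", "Communication Services"),
--     ("Transportation", "Industrials"),
--     ("Utilities", "Energy"),
-- ]
--
-- def _map_industry_to_sector(industry: str) -> str:
--     """Map industry to sector"""
--     lo, hi = 0, len(_SORTED)
--     while lo < hi:
--         mid = (lo + hi) // 2
--         key, sector = _SORTED[mid]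
--         if key == industry:
--             return sector
--         if industry < key:
--             hi = mid
--         else:
--             lo = mid + 1
--     return "Other"
-- ===== Notes on version B (the rewrite author's own statement) =====
-- stated objective: alternative
-- what changed: Replaces the per-call dict build and the loop scanning each sector's industry list with a hand-written binary search on a prebuilt lexicographically sorted (industry, sector) table, returning "Other" when the search range empties.
import Mathlib
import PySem

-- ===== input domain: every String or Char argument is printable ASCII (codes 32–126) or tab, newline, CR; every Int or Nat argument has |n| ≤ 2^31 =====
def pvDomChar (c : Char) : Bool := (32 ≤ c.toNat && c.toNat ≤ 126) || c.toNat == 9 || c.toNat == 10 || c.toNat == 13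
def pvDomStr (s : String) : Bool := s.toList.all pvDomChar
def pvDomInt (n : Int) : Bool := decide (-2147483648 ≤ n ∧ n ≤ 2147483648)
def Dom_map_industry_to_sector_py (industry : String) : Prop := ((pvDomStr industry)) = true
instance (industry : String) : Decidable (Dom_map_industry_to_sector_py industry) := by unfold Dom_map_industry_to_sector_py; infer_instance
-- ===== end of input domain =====

-- B replaces A's per-call dict build + sector-list-scanning loop by a binary search on a
-- prebuilt sorted (industry, sector) table with the same default "Other"; same return values.

-- ===== PORT A =====
def sectorMapA : List (String × List String) :=
  [("Technology", ["Technology Hardware", "Software", "Semiconductors", "Internet Services"]),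
   ("Communication Services", ["Telecommunications", "Media & Entertainment"]),
   ("Consumer Discretionary", ["E-commerce", "Retail", "Restaurants", "Automotive"]),
   ("Consumer Staples", ["Consumer Goods", "Food & Beverage"]),
   ("Financials", ["Financial Services", "Banking", "Insurance", "Real Estate"]),
   ("Healthcare", ["Pharmaceuticals", "Biotechnology", "Medical Devices", "Healthcare Services"]),
   ("Industrials", ["Aerospace & Defense", "Industrial Machinery", "Transportation", "Logistics", "Construction"]),
   ("Energy", ["Oil & Gas", "Utilities", "Renewable Energy"]),
   ("Materials", ["Materials"])]

-- the 'for sector, industries in sector_map.items(): if industry in industries: return sector' loop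
def loopA : List (String × List String) → String → String
  | [], _ => "Other"
  | (sector, industries) :: rest, industry =>
      if industries.contains industry then sector else loopA rest industry

def map_industry_to_sector_py (industry : String) : String :=
  loopA sectorMapA industry

-- ===== PORT B =====
def sortedB : List (String × String) :=
  [("Aerospace & Defense", "Industrials"), ("Automotive", "Consumer Discretionary"),
   ("Banking", "Financials"), ("Biotechnology", "Healthcare"),
   ("Construction", "Industrials"), ("Consumer Goods", "Consumer Staples"),
   ("E-commerce", "Consumer Discretionary"), ("Financial Services", "Financials"),
   ("Food & Beverage", "Consumer Staples"), ("Healthcare Services", "Healthcare"),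
   ("Industrial Machinery", "Industrials"), ("Insurance", "Financials"),
   ("Internet Services", "Technology"), ("Logistics", "Industrials"),
   ("Materials", "Materials"), ("Media & Entertainment", "Communication Services"),
   ("Medical Devices", "Healthcare"), ("Oil & Gas", "Energy"),
   ("Pharmaceuticals", "Healthcare"), ("Real Estate", "Financials"),
   ("Renewable Energy", "Energy"), ("Restaurants", "Consumer Discretionary"),
   ("Retail", "Consumer Discretionary"), ("Semiconductors", "Technology"),
   ("Software", "Technology"), ("Technology Hardware", "Technology"),
   ("Telecommunications", "Communication Services"), ("Transportation", "Industrials"),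
   ("Utilities", "Energy")]

-- Source B's 'while lo < hi' binary-search loop, ported with fuel = hi - lo (the loop's own bound);
-- getD's default is never used since mid < hi ≤ length on every iteration.
def bsearchB (industry : String) : Nat → Nat → Nat → String
  | 0, _, _ => "Other"
  | fuel + 1, lo, hi =>
      if lo < hi then
        let mid := (lo + hi) / 2
        let p := sortedB.getD mid ("", "Other")
        if p.1 == industry then p.2
        -- 'industry < key': Python's str < is lexicographic on code points, exact on List Char
        else if industry.toList < p.1.toList then bsearchB industry fuel lo mid
        else bsearchB industry fuel (mid + 1) hi
      else "Other"

def map_industry_to_sector_py_alt (industry : String) : String :=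
  bsearchB industry sortedB.length 0 sortedB.length

-- ===== PRECONDITION & SPEC =====
def Spec_map_industry_to_sector_py (industry : String) (out : String) : Prop := out = map_industry_to_sector_py_alt industry
instance (industry : String) (out : String) : Decidable (Spec_map_industry_to_sector_py industry out) := by unfold Spec_map_industry_to_sector_py; infer_instance

-- ===== CLAIM (what is proved, stated in full; the proofs are below) =====
def Claim_equal_map_industry_to_sector_py : Prop := ∀ (industry : String), Dom_map_industry_to_sector_py industry → Spec_map_industry_to_sector_py industry (map_industry_to_sector_py industry)

-- ===== LEMMAS AND PROOFS =====

def keysB : List String :=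
  ["Aerospace & Defense", "Automotive", "Banking", "Biotechnology", "Construction",
   "Consumer Goods", "E-commerce", "Financial Services", "Food & Beverage",
   "Healthcare Services", "Industrial Machinery", "Insurance", "Internet Services",
   "Logistics", "Materials", "Media & Entertainment", "Medical Devices", "Oil & Gas",
   "Pharmaceuticals", "Real Estate", "Renewable Energy", "Restaurants", "Retail",
   "Semiconductors", "Software", "Technology Hardware", "Telecommunications",
   "Transportation", "Utilities"]

theorem spec_of_mem (industry : String) (h : industry ∈ keysB) :
    map_industry_to_sector_py industry = map_industry_to_sector_py_alt industry := by
  fin_cases h <;> decide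

theorem spec_of_not_mem (industry : String) (h : industry ∉ keysB) :
    map_industry_to_sector_py industry = map_industry_to_sector_py_alt industry := by
  simp only [keysB, List.mem_cons, List.not_mem_nil, or_false, not_or] at h
  obtain ⟨h1,h2,h3,h4,h5,h6,h7,h8,h9,h10,h11,h12,h13,h14,h15,h16,h17,h18,h19,h20,h21,h22,h23,h24,h25,h26,h27,h28,h29⟩ := h
  unfold map_industry_to_sector_py map_industry_to_sector_py_alt loopA sectorMapA bsearchB
  simp [loopA, bsearchB, sortedB, List.getD,
        h1,h2,h3,h4,h5,h6,h7,h8,h9,h10,h11,h12,h13,h14,h15,h16,h17,h18,h19,h20,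
        h21,h22,h23,h24,h25,h26,h27,h28,h29, Ne.symm]

-- ===== VERDICT (by name: the statement is the Claim_ definition above) =====
theorem map_industry_to_sector_py_spec : Claim_equal_map_industry_to_sector_py := by
  intro industry _
  unfold Spec_map_industry_to_sector_py
  by_cases h : industry ∈ keysB
  · exact spec_of_mem industry h
  · exact spec_of_not_mem industry h
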